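-- pv_equiv track=rewrite | github.com/machine-learning-is-easy/coding-for-interview | questions/900-1000/915. Partition Array into Disjoint Intervals.py | partitionDisjoint
-- ===== SOURCE A (Python) =====
-- def partitionDisjoint(nums: list) -> int:
--     # binary search of the array
--
--     n = len(nums)
--     # max(left) <= min(right)
--     maxleft, minright = {}, {}
--     maxv, minv = float('-inf'), float('inf')
--
--     for i in range(n):
--         maxv = max(maxv, nums[i])
--         maxleft[i] = maxv
--
--     for i in range(n - 1, -1, -1):
--         minv = min(minv, nums[i])
--         minright[i] = minv
--
--     for i in range(n - 1):
--         if maxleft[i] <= minright[i + 1]: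
--             return i + 1
-- ===== SOURCE B (Python) =====
-- def partitionDisjoint(nums: list) -> int:
--     # Single pass, O(1) extra space: track overall running max and left-partition max;
--     # extend the boundary whenever an element is smaller than the left partition's max.
--     left_max = max_so_far = nums[0]
--     part = 0
--     for i in range(1, len(nums)):
--         x = nums[i]
--         if x < left_max:
--             part = i
--             left_max = max_so_far
--         else:
--             if x > max_so_far:
--                 max_so_far = x
--     return part + 1
-- ===== Notes on version B (the rewrite author's own statement) =====
-- stated objective: alternative
-- what changed: A builds prefix-max and suffix-min dicts in two extra passes plus a third scan; B is the classic single forward pass with O(1) extra space tracking the running max and the left-partition max, moving the boundary whenever an element is smaller than the left max.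
-- outside the precondition, e.g. on partitionDisjoint([2, 1]): A returns None, B returns 2; on partitionDisjoint([5]): A returns None, B returns 1
import Mathlib
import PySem

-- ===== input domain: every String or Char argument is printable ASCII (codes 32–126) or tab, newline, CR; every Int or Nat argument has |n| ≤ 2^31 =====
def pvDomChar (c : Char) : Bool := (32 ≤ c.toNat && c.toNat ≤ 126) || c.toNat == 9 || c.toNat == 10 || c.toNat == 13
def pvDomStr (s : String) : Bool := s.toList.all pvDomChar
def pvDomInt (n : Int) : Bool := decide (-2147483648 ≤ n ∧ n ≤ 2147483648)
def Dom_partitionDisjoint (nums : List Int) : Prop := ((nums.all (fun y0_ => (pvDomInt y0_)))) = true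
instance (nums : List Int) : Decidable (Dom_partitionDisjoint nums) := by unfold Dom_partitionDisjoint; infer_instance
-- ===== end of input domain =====

-- B replaces A's prefix-max/suffix-min dictionaries (three passes, O(n) extra space) by the
-- classic single forward pass over the list with O(1) extra state; same return value on Pre_ (alternative; no asymptotic speed-up).


-- ===== PORT A =====
-- max(maxv, x) / min(minv, x) where maxv/minv start as float('-inf') / float('inf'):
-- none plays the infinity, so the first comparison always picks x (exact for Int inputs).
def pyMaxOpt (a : Option Int) (x : Int) : Int := match a with | none => x | some v => max v x
def pyMinOpt (a : Option Int) (x : Int) : Int := match a with | none => x | some v => min v x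

def aStep1 (nums : List Int) (st : PySem.Dict Int Int × Option Int) (i : Int) :
    PySem.Dict Int Int × Option Int :=
  let mv := pyMaxOpt st.2 (PySem.List.pyGetD nums i 0)
  (st.1.insert i mv, some mv)

def aStep2 (nums : List Int) (st : PySem.Dict Int Int × Option Int) (i : Int) :
    PySem.Dict Int Int × Option Int :=
  let mv := pyMinOpt st.2 (PySem.List.pyGetD nums i 0)
  (st.1.insert i mv, some mv)

def aStep3 (maxleft minright : PySem.Dict Int Int) (acc : Option Int) (i : Int) : Option Int :=
  match acc with
  | some v => some v
  | none => if maxleft.getD i 0 ≤ minright.getD (i + 1) 0 then some (i + 1) else none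

def partitionDisjoint (nums : List Int) : Int :=
  let n : Int := nums.length
  let s1 := (PySem.List.pyRange 0 n 1).foldl (aStep1 nums) (PySem.Dict.empty, none)
  let s2 := (PySem.List.pyRange (n - 1) (-1) (-1)).foldl (aStep2 nums) (PySem.Dict.empty, none)
  let r := (PySem.List.pyRange 0 (n - 1) 1).foldl (aStep3 s1.1 s2.1) none
  match r with
  | some v => v
  | none => 0

-- ===== PORT B =====
def bStep (nums : List Int) (st : Int × Int × Int) (i : Int) : Int × Int × Int :=
  let x := PySem.List.pyGetD nums i 0
  if x < st.1 then (st.2.1, st.2.1, i)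
  else (st.1, if x > st.2.1 then x else st.2.1, st.2.2)

def partitionDisjoint_alt (nums : List Int) : Int :=
  let x0 := PySem.List.pyGetD nums 0 0
  let st := (PySem.List.pyRange 1 (nums.length : Int) 1).foldl (bStep nums) (x0, x0, 0)
  st.2.2 + 1

-- ===== PRECONDITION & SPEC =====
-- Pre_ excludes exactly the inputs on which Python A returns None instead of an int:
-- lists with fewer than two elements, and lists admitting no split point k (both sides
-- nonempty) with max(nums[:k]) <= min(nums[k:]).
def Pre_partitionDisjoint (nums : List Int) : Prop :=
  ∃ k < nums.length, nums.take k ≠ [] ∧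
    ∀ a ∈ nums.take k, ∀ b ∈ nums.drop k, a ≤ b
instance (nums : List Int) : Decidable (Pre_partitionDisjoint nums) := by
  unfold Pre_partitionDisjoint; infer_instance

def pvWitness_partitionDisjoint : List Int := [1, 0, 2, 5, 3]

def Spec_partitionDisjoint (nums : List Int) (out : Int) : Prop := out = partitionDisjoint_alt nums
instance (nums : List Int) (out : Int) : Decidable (Spec_partitionDisjoint nums out) := by unfold Spec_partitionDisjoint; infer_instance

-- ===== CLAIM (what is proved, stated in full; the proofs are below) =====
def Claim_equal_partitionDisjoint : Prop := ∀ (nums : List Int), Dom_partitionDisjoint nums → Pre_partitionDisjoint nums → Spec_partitionDisjoint nums (partitionDisjoint nums)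

-- ===== LEMMAS AND PROOFS =====


def pmaxI (nums : List Int) (i : Nat) : Int :=
  match nums with
  | [] => 0
  | x :: xs => (xs.take i).foldl max x

def sminI (nums : List Int) (j : Nat) : Int :=
  match nums.drop j with
  | [] => 0
  | x :: xs => xs.foldl min x

def PP (nums : List Int) (i : Nat) : Prop :=
  ∀ j : Nat, j < nums.length → i < j → pmaxI nums i ≤ nums.getD j 0

lemma foldl_max_mem (x : Int) (l : List Int) : l.foldl max x ∈ x :: l := by
  induction l generalizing x with
  | nil => simp
  | cons y ys ih =>
    rcases List.mem_cons.mp (ih (max x y)) with h | h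
    · rcases max_choice x y with hm | hm
      · exact List.mem_cons.mpr (Or.inl (h.trans hm))
      · exact List.mem_cons.mpr (Or.inr (List.mem_cons.mpr (Or.inl (h.trans hm))))
    · exact List.mem_cons.mpr (Or.inr (List.mem_cons.mpr (Or.inr h)))

lemma foldl_min_le (x : Int) (l : List Int) :
    l.foldl min x ≤ x ∧ ∀ y ∈ l, l.foldl min x ≤ y := by
  induction l generalizing x with
  | nil => simp
  | cons y ys ih =>
    obtain ⟨h1, h2⟩ := ih (min x y)
    refine ⟨le_trans h1 (min_le_left _ _), ?_⟩
    intro z hz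
    rcases List.mem_cons.mp hz with rfl | hz
    · exact le_trans h1 (min_le_right _ _)
    · exact h2 z hz

lemma foldl_min_mem (x : Int) (l : List Int) : l.foldl min x ∈ x :: l := by
  induction l generalizing x with
  | nil => simp
  | cons y ys ih =>
    rcases List.mem_cons.mp (ih (min x y)) with h | h
    · rcases min_choice x y with hm | hm
      · exact List.mem_cons.mpr (Or.inl (h.trans hm))
      · exact List.mem_cons.mpr (Or.inr (List.mem_cons.mpr (Or.inl (h.trans hm))))
    · exact List.mem_cons.mpr (Or.inr (List.mem_cons.mpr (Or.inr h)))

lemma pmax_zero (nums : List Int) (h : nums ≠ []) : pmaxI nums 0 = nums.getD 0 0 := by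
  cases nums with
  | nil => exact absurd rfl h
  | cons x xs => simp [pmaxI]

lemma pmax_succ (nums : List Int) (i : Nat) (h : i + 1 < nums.length) :
    pmaxI nums (i + 1) = max (pmaxI nums i) (nums.getD (i + 1) 0) := by
  cases nums with
  | nil => simp at h
  | cons x xs =>
    simp only [List.length_cons] at h
    have hi : i < xs.length := by omega
    simp only [pmaxI]
    rw [List.take_add_one, List.getElem?_eq_getElem hi]
    rw [Option.toList_some, List.foldl_append, List.foldl_cons, List.foldl_nil]
    simp [List.getD, List.getElem?_cons_succ, List.getElem?_eq_getElem hi]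

lemma smin_last (nums : List Int) (h : nums ≠ []) :
    sminI nums (nums.length - 1) = nums.getD (nums.length - 1) 0 := by
  have hl : 0 < nums.length := List.length_pos_iff.mpr h
  have h1 : nums.length - 1 < nums.length := by omega
  have hd : nums.drop (nums.length - 1) = [nums.getD (nums.length - 1) 0] := by
    rw [List.getD_eq_getElem _ _ h1, List.drop_eq_getElem_cons h1]
    rw [List.drop_eq_nil_iff.mpr (by omega)]
  simp [sminI, hd]

lemma smin_pred (nums : List Int) (j : Nat) (h : j + 1 < nums.length) :
    sminI nums j = min (nums.getD j 0) (sminI nums (j + 1)) := by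
  have hj : j < nums.length := by omega
  have hd : nums.drop j = nums.getD j 0 :: nums.drop (j + 1) := by
    rw [List.getD_eq_getElem _ _ hj]; exact List.drop_eq_getElem_cons hj
  have hd1 : nums.drop (j+1) ≠ [] := by
    intro hc; have := List.drop_eq_nil_iff.mp hc; omega
  obtain ⟨y, ys, hys⟩ := List.exists_cons_of_ne_nil hd1
  simp only [sminI, hd, hys]
  rw [List.foldl_cons, List.foldl_assoc]

lemma mem_take_le_pmax (nums : List Int) (i : Nat) (a : Int) (ha : a ∈ nums.take (i + 1)) :
    a ≤ pmaxI nums i := by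
  cases nums with
  | nil => simp at ha
  | cons x xs =>
    simp only [List.take_succ_cons, List.mem_cons] at ha
    rcases ha with rfl | ha
    · exact (PySem.List.le_foldl_max _ _).1
    · exact (PySem.List.le_foldl_max _ _).2 a ha

lemma pmax_mem (nums : List Int) (i : Nat) (h : nums ≠ []) :
    pmaxI nums i ∈ nums.take (i + 1) := by
  cases nums with
  | nil => exact absurd rfl h
  | cons x xs =>
    simp only [pmaxI, List.take_succ_cons]
    exact foldl_max_mem x (xs.take i)

lemma smin_le_mem (nums : List Int) (j : Nat) (b : Int) (hb : b ∈ nums.drop j) :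
    sminI nums j ≤ b := by
  rcases hd : nums.drop j with _ | ⟨c, cs⟩
  · rw [hd] at hb; simp at hb
  · rw [hd] at hb
    simp only [sminI, hd]
    rcases List.mem_cons.mp hb with rfl | hb
    · exact (foldl_min_le b cs).1
    · exact (foldl_min_le c cs).2 b hb

lemma smin_mem (nums : List Int) (j : Nat) (h : j < nums.length) :
    sminI nums j ∈ nums.drop j := by
  have hd1 : nums.drop j ≠ [] := by
    intro hc; have := List.drop_eq_nil_iff.mp hc; omega
  rcases hd : nums.drop j with _ | ⟨c, cs⟩
  · exact absurd hd hd1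
  · simp only [sminI, hd]
    exact foldl_min_mem c cs

lemma pmax_mono (nums : List Int) (i i' : Nat) (hle : i ≤ i') (h : nums ≠ []) :
    pmaxI nums i ≤ pmaxI nums i' := by
  apply mem_take_le_pmax
  have := pmax_mem nums i h
  have hsub : nums.take (i + 1) ⊆ nums.take (i' + 1) := by
    intro a ha
    have : a ∈ (nums.take (i' + 1)).take (i + 1) := by
      rw [List.take_take]; rwa [min_eq_left (by omega)]
    exact List.mem_of_mem_take this
  exact hsub this

lemma mem_drop_iff_getD (nums : List Int) (k : Nat) (a : Int) :
    a ∈ nums.drop k ↔ ∃ j : Nat, j < nums.length ∧ k ≤ j ∧ a = nums.getD j 0 := by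
  constructor
  · intro ha
    obtain ⟨j, hj, hja⟩ := List.getElem_of_mem ha
    rw [List.getElem_drop] at hja
    rw [List.length_drop] at hj
    exact ⟨k + j, by omega, by omega, by rw [List.getD_eq_getElem _ _ (by omega)]; exact hja.symm⟩
  · rintro ⟨j, hj, hkj, rfl⟩
    rw [List.getD_eq_getElem _ _ hj]
    have : j - k < (nums.drop k).length := by rw [List.length_drop]; omega
    have hget : (nums.drop k)[j - k]'this = nums[j]'(by omega) := by
      rw [List.getElem_drop]; congr 1; omega
    have hmem := List.getElem_mem this
    rw [hget] at hmem
    exact hmem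

lemma valid_iff_PP (nums : List Int) (i : Nat) (h : i < nums.length) :
    (∀ a ∈ nums.take (i + 1), ∀ b ∈ nums.drop (i + 1), a ≤ b) ↔ PP nums i := by
  have hne : nums ≠ [] := by intro hc; rw [hc] at h; simp at h
  constructor
  · intro hv j hj hij
    apply hv _ (pmax_mem nums i hne)
    exact (mem_drop_iff_getD nums (i+1) _).mpr ⟨j, hj, by omega, rfl⟩
  · intro hp a ha b hb
    obtain ⟨j, hj, hkj, rfl⟩ := (mem_drop_iff_getD nums (i+1) b).mp hb
    exact le_trans (mem_take_le_pmax nums i a ha) (hp j hj (by omega))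

lemma cond_iff_PP (nums : List Int) (i : Nat) (h : i + 1 < nums.length) :
    (pmaxI nums i ≤ sminI nums (i + 1)) ↔ PP nums i := by
  constructor
  · intro hc j hj hij
    refine le_trans hc (smin_le_mem nums (i+1) _ ?_)
    exact (mem_drop_iff_getD nums (i+1) _).mpr ⟨j, hj, by omega, rfl⟩
  · intro hp
    obtain ⟨j, hj, hkj, he⟩ := (mem_drop_iff_getD nums (i+1) _).mp (smin_mem nums (i+1) h)
    rw [he]
    exact hp j hj (by omega)

-- ================= loop 1 =================
lemma loop1 (nums : List Int) (c : Nat) (hc : c ≤ nums.length) :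
    (0 < c → ((PySem.List.pyRange 0 (c:Int) 1).foldl (aStep1 nums) (PySem.Dict.empty, none)).2
        = some (pmaxI nums (c - 1))) ∧
    (∀ j : Nat, j < c →
      ((PySem.List.pyRange 0 (c:Int) 1).foldl (aStep1 nums) (PySem.Dict.empty, none)).1.getD (j:Int) 0
        = pmaxI nums j) := by
  induction c with
  | zero => exact ⟨fun h => absurd h (by omega), fun j hj => absurd hj (by omega)⟩
  | succ c ih =>
    obtain ⟨ih2, ih1⟩ := ih (by omega)
    have hr : PySem.List.pyRange 0 ((c:Int) + 1) 1 = PySem.List.pyRange 0 (c:Int) 1 ++ [(c:Int)] :=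
      PySem.List.pyRange_one_succ_right (by omega)
    have hcast : ((c + 1 : Nat) : Int) = (c:Int) + 1 := by push_cast; ring
    rw [hcast, hr, List.foldl_append, List.foldl_cons, List.foldl_nil]
    set st := (PySem.List.pyRange 0 (c:Int) 1).foldl (aStep1 nums) (PySem.Dict.empty, none) with hst
    have hval : pyMaxOpt st.2 (PySem.List.pyGetD nums (c:Int) 0) = pmaxI nums c := by
      rcases Nat.eq_zero_or_pos c with rfl | hcpos
      · -- first iteration: maxv = -inf, so value is nums[0]
        have h2 : st.2 = none := by rw [hst]; rfl
        rw [h2]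
        have hne : nums ≠ [] := by intro hc0; rw [hc0] at hc; simp at hc
        simp only [pyMaxOpt, Nat.cast_zero, PySem.List.pyGetD_ofNat']
        exact (pmax_zero nums hne).symm
      · rw [ih2 hcpos]
        have hs := pmax_succ nums (c - 1) (by omega)
        have h1 : c - 1 + 1 = c := by omega
        rw [h1] at hs
        simp only [pyMaxOpt, PySem.List.pyGetD_natCast]
        exact hs.symm
    constructor
    · intro _
      simp only [aStep1, hval, Nat.add_sub_cancel]
    · intro j hj
      simp only [aStep1]
      rw [PySem.Dict.getD_insert]
      rcases Nat.lt_or_ge j c with h | h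
      · rw [if_neg (by intro he; exact absurd (by exact_mod_cast he) (Nat.ne_of_lt h)), ih1 j h]
      · have : j = c := by omega
        subst this
        rw [if_pos rfl, hval]

-- ================= loop 2 =================
lemma pyRange_down (n : Nat) :
    PySem.List.pyRange ((n:Int) - 1) (-1) (-1)
      = (List.range n).map (fun k : Nat => ((n:Int) - 1 - (k:Int))) := by
  simp only [PySem.List.pyRange]
  norm_num
  rcases Nat.eq_zero_or_pos n with rfl | hn
  · norm_num
  · rw [if_pos (by omega)]
    apply List.map_congr_left
    intro k _
    ring

lemma loop2 (nums : List Int) (c : Nat) (hc : c ≤ nums.length) :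
    (0 < c → (((List.range c).map (fun k : Nat => ((nums.length:Int) - 1 - (k:Int)))).foldl
        (aStep2 nums) (PySem.Dict.empty, none)).2 = some (sminI nums (nums.length - c))) ∧
    (∀ j : Nat, nums.length - c ≤ j → j < nums.length →
      (((List.range c).map (fun k : Nat => ((nums.length:Int) - 1 - (k:Int)))).foldl
        (aStep2 nums) (PySem.Dict.empty, none)).1.getD (j:Int) 0 = sminI nums j) := by
  induction c with
  | zero => exact ⟨fun h => absurd h (by omega), fun j hj hj' => absurd (by omega : False) id⟩
  | succ c ih =>
    obtain ⟨ih2, ih1⟩ := ih (by omega)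
    rw [List.range_succ, List.map_append, List.foldl_append]
    simp only [List.map_cons, List.map_nil, List.foldl_cons, List.foldl_nil]
    set st := ((List.range c).map (fun k : Nat => ((nums.length:Int) - 1 - (k:Int)))).foldl
        (aStep2 nums) (PySem.Dict.empty, none) with hst
    have hidx : ((nums.length:Int) - 1 - (c:Int)) = ((nums.length - 1 - c : Nat) : Int) := by
      omega
    have hj0 : nums.length - 1 - c = nums.length - (c + 1) := by omega
    have hval : pyMinOpt st.2 (PySem.List.pyGetD nums ((nums.length:Int) - 1 - (c:Int)) 0)
        = sminI nums (nums.length - (c + 1)) := by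
      rw [hidx, PySem.List.pyGetD_natCast, hj0]
      rcases Nat.eq_zero_or_pos c with rfl | hcpos
      · have h2 : st.2 = none := by rw [hst]; rfl
        rw [h2]
        have hne : nums ≠ [] := by intro hc0; rw [hc0] at hc; simp at hc
        have := smin_last nums hne
        simp only [pyMinOpt]
        rw [show nums.length - (0 + 1) = nums.length - 1 from by omega, this]
      · rw [ih2 hcpos]
        have hs := smin_pred nums (nums.length - (c + 1)) (by omega)
        rw [show nums.length - (c + 1) + 1 = nums.length - c from by omega] at hs
        simp only [pyMinOpt]
        rw [hs, min_comm]
    constructor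
    · intro _
      simp only [aStep2, hval]
    · intro j hjge hjlt
      simp only [aStep2]
      rw [PySem.Dict.getD_insert]
      by_cases he : (j:Int) = (nums.length:Int) - 1 - (c:Int)
      · rw [if_pos he, hval]
        congr 1
        omega
      · rw [if_neg he]
        exact ih1 j (by omega) hjlt

-- ================= loop 3 =================
lemma loop3_none (d1 d2 : PySem.Dict Int Int) (m : Nat)
    (hall : ∀ j : Nat, j < m → ¬ (d1.getD (j:Int) 0 ≤ d2.getD ((j:Int) + 1) 0)) :
    ((List.range m).map (fun k : Nat => (k:Int))).foldl (aStep3 d1 d2) none = none := by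
  induction m with
  | zero => rfl
  | succ m ih =>
    rw [List.range_succ, List.map_append, List.foldl_append]
    rw [ih (fun j hj => hall j (by omega))]
    simp only [List.map_cons, List.map_nil, List.foldl_cons, List.foldl_nil, aStep3]
    rw [if_neg (hall m (by omega))]

lemma loop3 (d1 d2 : PySem.Dict Int Int) (m i0 : Nat)
    (h0 : d1.getD (i0:Int) 0 ≤ d2.getD ((i0:Int) + 1) 0)
    (hmin : ∀ j : Nat, j < i0 → ¬ (d1.getD (j:Int) 0 ≤ d2.getD ((j:Int) + 1) 0))
    (hlt : i0 < m) :
    ((List.range m).map (fun k : Nat => (k:Int))).foldl (aStep3 d1 d2) none = some ((i0:Int) + 1) := by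
  induction m with
  | zero => omega
  | succ m ih =>
    rw [List.range_succ, List.map_append, List.foldl_append]
    rcases Nat.lt_or_ge i0 m with h | h
    · rw [ih h]
      simp only [List.map_cons, List.map_nil, List.foldl_cons, List.foldl_nil]
      rfl
    · have : i0 = m := by omega
      subst this
      rw [loop3_none d1 d2 i0 hmin]
      simp only [List.map_cons, List.map_nil, List.foldl_cons, List.foldl_nil, aStep3]
      rw [if_pos h0]

-- ================= lemA =================
lemma lemA (nums : List Int) (i0 : Nat) (hn : 2 ≤ nums.length)
    (h0 : PP nums i0) (hmin : ∀ q < i0, ¬ PP nums q) (hlt : i0 < nums.length - 1) :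
    partitionDisjoint nums = (i0 : Int) + 1 := by
  have hne : nums ≠ [] := by intro hc0; rw [hc0] at hn; simp at hn
  simp only [partitionDisjoint]
  rw [pyRange_down nums.length]
  set d1 := ((PySem.List.pyRange 0 (nums.length:Int) 1).foldl (aStep1 nums) (PySem.Dict.empty, none)).1 with hd1def
  set d2 := (((List.range nums.length).map (fun k : Nat => ((nums.length:Int) - 1 - (k:Int)))).foldl (aStep2 nums) (PySem.Dict.empty, none)).1 with hd2def
  have hd1 : ∀ j : Nat, j < nums.length → d1.getD (j:Int) 0 = pmaxI nums j :=
    (loop1 nums nums.length le_rfl).2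
  have hd2 : ∀ j : Nat, j < nums.length → d2.getD (j:Int) 0 = sminI nums j :=
    fun j hj => (loop2 nums nums.length le_rfl).2 j (by omega) hj
  have hcond : ∀ j : Nat, j + 1 < nums.length →
      ((d1.getD (j:Int) 0 ≤ d2.getD ((j:Int) + 1) 0) ↔ PP nums j) := by
    intro j hj
    rw [hd1 j (by omega), show ((j:Int) + 1) = ((j + 1 : Nat) : Int) from by push_cast; ring,
      hd2 (j + 1) hj]
    exact cond_iff_PP nums j hj
  have hr3 : PySem.List.pyRange 0 ((nums.length:Int) - 1) 1
      = (List.range (nums.length - 1)).map (fun k : Nat => (k:Int)) := by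
    rw [show ((nums.length:Int) - 1) = ((nums.length - 1 : Nat) : Int) from by omega]
    exact PySem.List.pyRange_zero_natCast (nums.length - 1)
  rw [hr3, loop3 d1 d2 (nums.length - 1) i0
    ((hcond i0 (by omega)).mpr h0)
    (fun j hj => fun hc => hmin j hj ((hcond j (by omega)).mp hc))
    hlt]

-- ================= B side =================
def QQ (nums : List Int) (q m : Nat) : Prop :=
  ∀ j : Nat, j < nums.length → q < j → j ≤ m → pmaxI nums q ≤ nums.getD j 0

lemma QQ_iff_PP (nums : List Int) (q : Nat) :
    QQ nums q (nums.length - 1) ↔ PP nums q := by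
  constructor
  · intro h j hj hqj; exact h j hj hqj (by omega)
  · intro h j hj hqj _; exact h j hj hqj

lemma pyRange_one_up (n : Nat) :
    PySem.List.pyRange 1 (n:Int) 1 = (List.range (n - 1)).map (fun k : Nat => (1:Int) + (k:Int)) := by
  rw [PySem.List.pyRange_of_pos 1 (n:Int) (by omega)]
  rcases Nat.lt_or_ge 1 n with h | h
  · rw [if_pos (by exact_mod_cast h)]
    rw [show (((n:Int) - 1 + 1 - 1) / 1).toNat = n - 1 from by omega]
    apply List.map_congr_left
    intro k _
    ring
  · rw [if_neg (by exact_mod_cast Nat.not_lt.mpr h)]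
    rw [show n - 1 = 0 from by omega]
    rfl

lemma loopB (nums : List Int) (hne : nums ≠ []) (c : Nat) (hc : c ≤ nums.length - 1) :
    ∃ pn : Nat, pn ≤ c ∧
      ((List.range c).map (fun k : Nat => (1:Int) + (k:Int))).foldl (bStep nums)
          (PySem.List.pyGetD nums 0 0, PySem.List.pyGetD nums 0 0, 0)
        = (pmaxI nums pn, pmaxI nums c, (pn:Int))
      ∧ QQ nums pn c ∧ (∀ q < pn, ¬ QQ nums q c) := by
  have hx0 : PySem.List.pyGetD nums 0 0 = pmaxI nums 0 := by
    rw [PySem.List.pyGetD_ofNat', pmax_zero nums hne]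
  induction c with
  | zero =>
    refine ⟨0, le_rfl, ?_, ?_, ?_⟩
    · simp only [List.range_zero, List.map_nil, List.foldl_nil, hx0, Nat.cast_zero]
    · intro j _ _ hj0; omega
    · intro q hq; omega
  | succ c ih =>
    obtain ⟨pn, hpnle, hfold, hQ, hQmin⟩ := ih (by omega)
    rw [List.range_succ, List.map_append, List.foldl_append, hfold]
    simp only [List.map_cons, List.map_nil, List.foldl_cons, List.foldl_nil]
    have hidx : ((1:Int) + (c:Int)) = ((c + 1 : Nat) : Int) := by push_cast; ring
    have hx : PySem.List.pyGetD nums ((1:Int) + (c:Int)) 0 = nums.getD (c + 1) 0 := by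
      rw [hidx, PySem.List.pyGetD_natCast]
    have hsucc : pmaxI nums (c + 1) = max (pmaxI nums c) (nums.getD (c + 1) 0) :=
      pmax_succ nums c (by omega)
    simp only [bStep, hx]
    by_cases hlt : nums.getD (c + 1) 0 < pmaxI nums pn
    · rw [if_pos hlt]
      refine ⟨c + 1, le_rfl, ?_, ?_, ?_⟩
      · have hmono : pmaxI nums pn ≤ pmaxI nums c := pmax_mono nums pn c hpnle hne
        have : pmaxI nums (c + 1) = pmaxI nums c := by
          rw [hsucc]; omega
        rw [this, hidx]
      · intro j _ hj1 hj2; omega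
      · intro q hq hQq
        rcases Nat.lt_or_ge q pn with h | h
        · exact hQmin q h (fun j hj hqj hjc => hQq j hj hqj (by omega))
        · have h1 : pmaxI nums pn ≤ pmaxI nums q := pmax_mono nums pn q h hne
          have h2 := hQq (c + 1) (by omega) (by omega) le_rfl
          omega
    · rw [if_neg hlt]
      refine ⟨pn, by omega, ?_, ?_, ?_⟩
      · have : (if pmaxI nums c < nums.getD (c + 1) 0 then nums.getD (c + 1) 0 else pmaxI nums c)
            = pmaxI nums (c + 1) := by
          rw [hsucc]
          by_cases h : pmaxI nums c < nums.getD (c + 1) 0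
          · rw [if_pos h]; omega
          · rw [if_neg h]; omega
        rw [this]
      · intro j hj hqj hjle
        rcases Nat.lt_or_ge j (c + 1) with h | h
        · exact hQ j hj hqj (by omega)
        · have : j = c + 1 := by omega
          subst this
          omega
      · intro q hq hQq
        exact hQmin q hq (fun j hj hqj hjc => hQq j hj hqj (by omega))

lemma lemB (nums : List Int) (i0 : Nat) (hn : 1 ≤ nums.length)
    (h0 : PP nums i0) (hmin : ∀ q < i0, ¬ PP nums q) :
    partitionDisjoint_alt nums = (i0 : Int) + 1 := by
  have hne : nums ≠ [] := by intro hc0; rw [hc0] at hn; simp at hn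
  simp only [partitionDisjoint_alt]
  rw [pyRange_one_up nums.length]
  obtain ⟨pn, hpnle, hfold, hQ, hQmin⟩ := loopB nums hne (nums.length - 1) le_rfl
  rw [hfold]
  have hPPpn : PP nums pn := (QQ_iff_PP nums pn).mp hQ
  have hpe : pn = i0 := by
    rcases Nat.lt_trichotomy pn i0 with h | h | h
    · exact absurd hPPpn (hmin pn h)
    · exact h
    · exact absurd ((QQ_iff_PP nums i0).mpr h0) (hQmin i0 h)
  rw [hpe]

-- ===== VERDICT (by name: the statement is the Claim_ definition above) =====
theorem partitionDisjoint_spec : Claim_equal_partitionDisjoint := by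
  intro nums _dom hpre
  obtain ⟨k, hk, htk, hv⟩ := hpre
  have hk0 : 0 < k ∧ nums ≠ [] := by
    rcases Nat.eq_zero_or_pos k with rfl | h
    · simp at htk
    · exact ⟨h, by intro hc; rw [hc, List.take_nil] at htk; exact htk rfl⟩
  have hn : 2 ≤ nums.length := by omega
  obtain ⟨hk0, _⟩ := hk0
  haveI : DecidablePred (PP nums) := fun i => Classical.dec _
  have hPk : PP nums (k - 1) := by
    have hk1 : k - 1 + 1 = k := Nat.succ_pred_eq_of_pos hk0
    have := (valid_iff_PP nums (k - 1) (by omega)).mp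
    rw [hk1] at this
    exact this hv
  have hex : ∃ i, PP nums i := ⟨k - 1, hPk⟩
  set i0 := Nat.find hex with hi0
  have h0 : PP nums i0 := Nat.find_spec hex
  have hmin : ∀ q < i0, ¬ PP nums q := fun q hq => Nat.find_min hex hq
  have hlt : i0 < nums.length - 1 := by
    have : i0 ≤ k - 1 := Nat.find_min' hex hPk
    omega
  unfold Spec_partitionDisjoint
  rw [lemA nums i0 hn h0 hmin hlt, lemB nums i0 (by omega) h0 hmin]
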